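-- pv_equiv track=rewrite | github.com/sethuakasanji/ProteogenomiX_Tool | core_analysis.py | validate_fasta_format
-- ===== SOURCE A (Python) =====
-- def validate_fasta_format(content: str) -> bool:
--     """Validate FASTA file format"""
--     lines = content.strip().split('\n')
--     has_header = False
--     has_sequence = False
--
--     for line in lines:
--         line = line.strip()
--         if not line:
--             continue
--         if line.startswith('>'):
--             has_header = True
--         elif has_header and not line.startswith('>'):
--             has_sequence = True
--             break
--
--     return has_header and has_sequence
-- ===== SOURCE B (Python) =====
-- def validate_fasta_format(content: str) -> bool:
--     """Order-check formulation: collect the header-flag of every non-blank stripped line;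
--     the content is valid iff that boolean sequence is out of sorted order, i.e. some
--     header (True) occurs strictly before a sequence line (False)."""
--     flags = [ln.startswith('>')
--              for ln in (raw.strip() for raw in content.strip().split('\n'))
--              if ln]
--     return flags != sorted(flags)
-- ===== Notes on version B (the rewrite author's own statement) =====
-- stated objective: alternative
-- what changed: Replaces A's two-flag state-machine scan with an order-check formulation: build the list of header-flags of the non-blank stripped lines and declare the content valid iff that boolean list differs from its sorted version (i.e. some header precedes a sequence line).
import Mathlib
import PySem

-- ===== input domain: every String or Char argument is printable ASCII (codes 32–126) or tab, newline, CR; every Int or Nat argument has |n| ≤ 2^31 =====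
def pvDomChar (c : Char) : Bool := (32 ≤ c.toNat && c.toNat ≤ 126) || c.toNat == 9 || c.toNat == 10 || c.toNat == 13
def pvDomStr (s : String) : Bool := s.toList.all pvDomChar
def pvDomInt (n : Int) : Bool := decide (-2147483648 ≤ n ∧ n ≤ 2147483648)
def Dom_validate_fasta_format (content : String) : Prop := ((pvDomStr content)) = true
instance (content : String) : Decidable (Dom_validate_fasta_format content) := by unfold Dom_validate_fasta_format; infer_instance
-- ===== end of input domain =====

-- B recasts the validation as an order check: collect the header-flag of every non-blank
-- stripped line and test whether that boolean sequence is out of sorted order (a True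
-- before a False); alternative formulation, same cost.

-- ===== PORT A =====
-- the for-loop: state (has_header, has_sequence); 'break' returns the pair immediately
def pvLoopA : List (List Char) → Bool → Bool → Bool × Bool
  | [], h, s => (h, s)
  | line :: rest, h, s =>
    let l := PySem.Chars.strip line
    if PySem.Chars.len l == 0 then pvLoopA rest h s
    else if PySem.Chars.startswith l ['>'] then pvLoopA rest true s
    else if h then (h, true)   -- break
    else pvLoopA rest h s

def validate_fasta_format (content : String) : Bool :=
  let lines := PySem.Chars.splitOn (PySem.Chars.strip content.toList) ['\n']
  let r := pvLoopA lines false false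
  r.1 && r.2

-- ===== PORT B =====
def validate_fasta_format_alt (content : String) : Bool :=
  let flags :=
    (((PySem.Chars.splitOn (PySem.Chars.strip content.toList) ['\n']).map
        PySem.Chars.strip).filter
      (fun l => !(PySem.Chars.len l == 0))).map
      (fun l => PySem.Chars.startswith l ['>'])
  !(flags == PySem.List.sorted flags (fun b => b) false)

-- ===== PRECONDITION & SPEC =====
def Spec_validate_fasta_format (content : String) (out : Bool) : Prop := out = validate_fasta_format_alt content
instance (content : String) (out : Bool) : Decidable (Spec_validate_fasta_format content out) := by unfold Spec_validate_fasta_format; infer_instance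

-- ===== CLAIM (what is proved, stated in full; the proofs are below) =====
def Claim_equal_validate_fasta_format : Prop := ∀ (content : String), Dom_validate_fasta_format content → Spec_validate_fasta_format content (validate_fasta_format content)

-- ===== LEMMAS AND PROOFS =====

-- the header-flag sequence of a list of raw lines (blank lines skipped)
def flagsOf : List (List Char) → List Bool
  | [] => []
  | line :: rest =>
    let l := PySem.Chars.strip line
    if l = [] then flagsOf rest
    else PySem.Chars.startswith l ['>'] :: flagsOf rest

-- the sorted order of a list of Bools: all falses, then all trues
def canon (f : List Bool) : List Bool :=
  List.replicate (f.count false) false ++ List.replicate (f.count true) true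

lemma flags_eq (lines : List (List Char)) :
    ((lines.map PySem.Chars.strip).filter (fun l => !(PySem.Chars.len l == 0))).map
        (fun l => PySem.Chars.startswith l ['>']) = flagsOf lines := by
  induction lines with
  | nil => simp [flagsOf]
  | cons line rest ih =>
    simp only [List.map_cons, List.filter_cons, flagsOf, PySem.Chars.len] at ih ⊢
    by_cases h : PySem.Chars.strip line = []
    · simp [h, ih]
    · simp [h, List.length_eq_zero_iff, ih]

lemma canon_perm (f : List Bool) : (canon f).Perm f := by
  induction f with
  | nil => simp [canon]
  | cons b t ih =>
    cases b
    · simpa [canon, List.count_cons, List.replicate_succ] using ih.cons false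
    · have : canon (true :: t) =
          List.replicate (t.count false) false ++ true :: List.replicate (t.count true) true := by
        simp [canon, List.count_cons, List.replicate_succ]
      rw [this]
      exact (List.perm_middle).trans (ih.cons true)

lemma canon_pairwise (f : List Bool) : (canon f).Pairwise (· ≤ ·) := by
  unfold canon
  refine List.pairwise_append.2 ⟨?_, ?_, ?_⟩
  · exact List.pairwise_replicate.2 (Or.inr le_rfl)
  · exact List.pairwise_replicate.2 (Or.inr le_rfl)
  · intro a ha b hb
    simp_all [List.eq_of_mem_replicate ha, List.eq_of_mem_replicate hb]

lemma sorted_eq_canon (f : List Bool) :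
    PySem.List.sorted f (fun b => b) false = canon f :=
  PySem.List.sorted_id_eq_of_perm_of_pairwise f (canon f) (canon_perm f) (canon_pairwise f)

lemma canon_cons_false (f : List Bool) : canon (false :: f) = false :: canon f := by
  simp [canon, List.count_cons, List.replicate_succ]

lemma all_true_of_count_false_zero (f : List Bool) (h : f.count false = 0) :
    f = List.replicate (f.count true) true := by
  induction f with
  | nil => simp
  | cons b t ih =>
    cases b
    · simp [List.count_cons] at h
    · simp only [List.count_cons] at h ⊢
      simpa [List.replicate_succ] using ih h

lemma canon_true_eq_iff (f : List Bool) :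
    decide (true :: f ≠ canon (true :: f)) = f.any (fun b => !b) := by
  by_cases h : f.count false = 0
  · have hc : canon (true :: f) = true :: f := by
      rw [canon]
      simp only [List.count_cons, h]
      simp [List.replicate_succ]
      exact (all_true_of_count_false_zero f h).symm
    have hany : f.any (fun b => !b) = false := by
      rw [List.any_eq_false]
      intro b hb
      cases b
      · exact absurd (List.count_pos_iff.2 hb) (by omega)
      · simp
    simp [hc, hany]
  · have hmem : false ∈ f := List.count_pos_iff.1 (Nat.pos_of_ne_zero h)
    have hne : true :: f ≠ canon (true :: f) := by
      intro he
      have : (canon (true :: f)).head? = some true := by rw [← he]; rfl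
      rw [canon] at this
      simp only [List.count_cons, if_neg] at this
      rcases Nat.exists_eq_succ_of_ne_zero h with ⟨k, hk⟩
      simp [hk, List.replicate_succ] at this
    have hany : f.any (fun b => !b) = true := by
      rw [List.any_eq_true]; exact ⟨false, hmem, rfl⟩
    simp [hne, hany]

-- phase 2 of A's loop (header already seen): true iff some later flag is false
lemma loopA_phase2 (lines : List (List Char)) :
    ((pvLoopA lines true false).1 && (pvLoopA lines true false).2) =
      (flagsOf lines).any (fun b => !b) := by
  induction lines with
  | nil => simp [pvLoopA, flagsOf]
  | cons line rest ih =>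
    simp only [pvLoopA, flagsOf]
    by_cases hemp : PySem.Chars.strip line = []
    · simp [hemp, PySem.Chars.len, ih]
    · by_cases hs : PySem.Chars.startswith (PySem.Chars.strip line) ['>']
      · simp [PySem.Chars.len, List.length_eq_zero_iff, hemp, hs, ih]
      · simp [PySem.Chars.len, List.length_eq_zero_iff, hemp, hs]

-- phase 1 of A's loop: true iff the flag sequence is out of sorted order
lemma loopA_phase1 (lines : List (List Char)) :
    ((pvLoopA lines false false).1 && (pvLoopA lines false false).2) =
      decide (flagsOf lines ≠ canon (flagsOf lines)) := by
  induction lines with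
  | nil => simp [pvLoopA, flagsOf, canon]
  | cons line rest ih =>
    simp only [pvLoopA, flagsOf]
    by_cases hemp : PySem.Chars.strip line = []
    · simp [hemp, PySem.Chars.len, ih]
    · by_cases hs : PySem.Chars.startswith (PySem.Chars.strip line) ['>']
      · simp [PySem.Chars.len, List.length_eq_zero_iff, hemp, hs, loopA_phase2]
        rw [← canon_true_eq_iff]
        simp [ne_eq, decide_not]
      · simp only [PySem.Chars.len, hemp, hs]
        simp [canon_cons_false, ih]

-- ===== VERDICT (by name: the statement is the Claim_ definition above) =====
theorem validate_fasta_format_spec : Claim_equal_validate_fasta_format := by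
  intro content _
  unfold Spec_validate_fasta_format validate_fasta_format validate_fasta_format_alt
  simp only [flags_eq, sorted_eq_canon, loopA_phase1]
  simp only [ne_eq, decide_not, Bool.beq_eq_decide_eq]
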